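-- pv_equiv track=rewrite | github.com/phbruce/hacker-rank-python-skeleton | script.py | playingWithNumbers
-- ===== SOURCE A (Python) =====
-- def playingWithNumbers(arr, queries):
--     matrix = []
--
--     def sum_abs(arr):
--         return sum([abs(i) for i in arr])
--
--     def sum_item(agg, arr, query):
--         return [agg.append(a + query) for a in arr]
--
--     for idx, query in enumerate(queries):
--         agg = []
--
--         if idx == 0:
--             sum_item(agg, arr, query)
--             matrix.append(agg)
--         else:
--             new_arr = matrix[idx-1]
--             sum_item(agg, new_arr, query)
--             matrix.append(agg)
--
--     return [sum_abs(agg) for agg in matrix]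
-- ===== SOURCE B (Python) =====
-- def playingWithNumbers(arr, queries):
--     out = []
--     shift = 0
--     for q in queries:
--         shift += q
--         out.append(sum(abs(a + shift) for a in arr))
--     return out
-- ===== Notes on version B (the rewrite author's own statement) =====
-- stated objective: faster
-- what changed: B keeps only a running scalar shift (prefix sum of the queries) and sums |a+shift| directly per query, instead of materialising and re-shifting a whole matrix of intermediate arrays.
import Mathlib
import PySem

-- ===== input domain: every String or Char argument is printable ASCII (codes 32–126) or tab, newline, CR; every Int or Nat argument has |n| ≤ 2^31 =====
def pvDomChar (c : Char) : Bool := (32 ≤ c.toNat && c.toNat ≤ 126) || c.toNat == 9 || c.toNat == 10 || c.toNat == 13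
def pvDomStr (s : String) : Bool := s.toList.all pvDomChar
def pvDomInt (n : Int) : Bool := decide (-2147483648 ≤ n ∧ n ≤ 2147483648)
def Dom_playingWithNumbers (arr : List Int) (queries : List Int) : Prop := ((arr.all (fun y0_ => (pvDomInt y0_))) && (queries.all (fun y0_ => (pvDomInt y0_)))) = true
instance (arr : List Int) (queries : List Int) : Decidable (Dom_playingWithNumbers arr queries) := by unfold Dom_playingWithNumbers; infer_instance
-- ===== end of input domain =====

-- B replaces A's matrix of re-shifted intermediate arrays by a running scalar shift
-- (prefix sum of the queries), summing |a+shift| directly per query: simpler, O(1) extra memory.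


-- ===== PORT A =====
-- sum_abs(arr) = sum([abs(i) for i in arr])
def pwnSumAbs (l : List Int) : Int := (l.map (fun i => |i|)).sum

-- the `for idx, query in enumerate(queries)` loop; `sum_item(agg, xs, query)` fills agg
-- with [a + query for a in xs], i.e. xs.map (· + query).  matrix[idx-1] is always in
-- range (idx = matrix.length on entry of each iteration), ported with getD [].
def pwnLoop (arr : List Int) : Nat → List (List Int) → List Int → List (List Int)
  | _, matrix, [] => matrix
  | idx, matrix, query :: rest =>
    if idx == 0 then
      pwnLoop arr (idx + 1) (matrix ++ [arr.map (fun a => a + query)]) rest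
    else
      pwnLoop arr (idx + 1)
        (matrix ++ [(matrix.getD (idx - 1) []).map (fun a => a + query)]) rest

def playingWithNumbers (arr : List Int) (queries : List Int) : List Int :=
  (pwnLoop arr 0 [] queries).map pwnSumAbs

-- ===== PORT B =====
def playingWithNumbers_alt (arr : List Int) (queries : List Int) : List Int :=
  (queries.foldl
    (fun (acc : Int × List Int) q =>
      let s := acc.1 + q
      (s, acc.2 ++ [(arr.map (fun a => |a + s|)).sum]))
    (0, [])).2

-- ===== PRECONDITION & SPEC =====
def Spec_playingWithNumbers (arr : List Int) (queries : List Int) (out : List Int) : Prop := out = playingWithNumbers_alt arr queries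
instance (arr : List Int) (queries : List Int) (out : List Int) : Decidable (Spec_playingWithNumbers arr queries out) := by unfold Spec_playingWithNumbers; infer_instance

-- ===== CLAIM (what is proved, stated in full; the proofs are below) =====
def Claim_equal_playingWithNumbers : Prop := ∀ (arr : List Int) (queries : List Int), Dom_playingWithNumbers arr queries → Spec_playingWithNumbers arr queries (playingWithNumbers arr queries)

-- ===== LEMMAS AND PROOFS =====

-- the list of successively shifted copies of arr: [arr+ (s+q1), arr+(s+q1+q2), …]
def shiftLists (arr : List Int) : Int → List Int → List (List Int)
  | _, [] => []
  | s, q :: rest => arr.map (fun a => a + (s + q)) :: shiftLists arr (s + q) rest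

lemma map_add_add (arr : List Int) (s q : Int) :
    (arr.map (fun a => a + s)).map (fun a => a + q) = arr.map (fun a => a + (s + q)) := by
  simp [List.map_map, Function.comp_def, add_assoc]

lemma pwnLoop_inv (arr : List Int) :
    ∀ (qs : List Int) (s : Int) (m : List (List Int)),
      pwnLoop arr (m ++ [arr.map (fun a => a + s)]).length (m ++ [arr.map (fun a => a + s)]) qs
        = (m ++ [arr.map (fun a => a + s)]) ++ shiftLists arr s qs := by
  intro qs
  induction qs with
  | nil => intro s m; simp [pwnLoop, shiftLists]
  | cons q rest ih =>
    intro s m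
    have hlen : (m ++ [arr.map (fun a => a + s)]).length = m.length + 1 := by simp
    have hget : (m ++ [arr.map (fun a => a + s)]).getD m.length [] = arr.map (fun a => a + s) := by
      simp [List.getD]
    rw [hlen]
    show pwnLoop arr (m.length + 1) (m ++ [arr.map (fun a => a + s)]) (q :: rest) = _
    rw [pwnLoop]
    simp only [Nat.add_sub_cancel, hget, if_neg (by simp : ¬ (m.length + 1 == 0) = true)]
    rw [map_add_add]
    have h2 : m ++ [arr.map (fun a => a + s)] ++ [arr.map (fun a => a + (s + q))]
        = (m ++ [arr.map (fun a => a + s)]) ++ [arr.map (fun a => a + (s + q))] := by simp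
    have := ih (s + q) (m ++ [arr.map (fun a => a + s)])
    have hlen2 : ((m ++ [arr.map (fun a => a + s)]) ++ [arr.map (fun a => a + (s + q))]).length
        = m.length + 1 + 1 := by simp
    rw [hlen2] at this
    rw [h2, this]
    simp [shiftLists]

lemma pwnLoop_eq (arr : List Int) (qs : List Int) :
    pwnLoop arr 0 [] qs = shiftLists arr 0 qs := by
  cases qs with
  | nil => simp [pwnLoop, shiftLists]
  | cons q rest =>
    rw [pwnLoop]
    simp only [show ((0 == 0) = true) = True by simp, if_true]
    have := pwnLoop_inv arr rest (0 + q) ([] : List (List Int))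
    simp only [List.nil_append, List.length_cons, List.length_nil, zero_add] at this
    simp only [List.nil_append]
    rw [this]
    simp [shiftLists]

lemma alt_inv (arr : List Int) :
    ∀ (qs : List Int) (s : Int) (out : List Int),
      (qs.foldl
        (fun (acc : Int × List Int) q =>
          let s := acc.1 + q
          (s, acc.2 ++ [(arr.map (fun a => |a + s|)).sum]))
        (s, out)).2 = out ++ (shiftLists arr s qs).map pwnSumAbs := by
  intro qs
  induction qs with
  | nil => intro s out; simp [shiftLists]
  | cons q rest ih =>
    intro s out
    simp only [List.foldl_cons]
    rw [ih]
    simp [shiftLists, pwnSumAbs, List.map_map, Function.comp_def]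

-- ===== VERDICT (by name: the statement is the Claim_ definition above) =====
theorem playingWithNumbers_spec : Claim_equal_playingWithNumbers := by
  intro arr queries _
  show playingWithNumbers arr queries = playingWithNumbers_alt arr queries
  rw [playingWithNumbers, playingWithNumbers_alt, pwnLoop_eq, alt_inv]
  simp
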